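-- pv_equiv track=rewrite | github.com/sarnthil/emotion-classification-roles | scripts/position_experiment/position.py | get_cue_annotations
-- ===== SOURCE A (Python) =====
-- def get_cue_annotations(annotations):
--     # FIX ME
--     cue_keys = [key for key in annotations if key.startswith("cue-")]
--     state = "O"
--     for parts in zip(*(annotations[cue_key] for cue_key in cue_keys)):
--         if "B" in set(parts) or "I" in set(parts):
--             state = "B" if state == "O" else "I"
--         else:
--             state = "O"
--         yield state
-- ===== SOURCE B (Python) =====
-- def get_cue_annotations(annotations):
--     cue_keys = [key for key in annotations if key.startswith("cue-")]
--     cols = [annotations[key] for key in cue_keys]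
--     n = min((len(col) for col in cols), default=0)
--     present = [any(col[i] in ("B", "I") for col in cols) for i in range(n)]
--     return ["O" if not present[i]
--             else "B" if i == 0 or not present[i - 1]
--             else "I"
--             for i in range(n)]
-- ===== Notes on version B (the rewrite author's own statement) =====
-- stated objective: alternative
-- what changed: Replaces the running BIO state variable with a two-phase formulation: first a boolean presence list per position, then each output label computed locally from present[i] and present[i-1] (B at a True-run start, I inside, O elsewhere); A is a lazy generator, B returns the list.
import Mathlib
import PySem

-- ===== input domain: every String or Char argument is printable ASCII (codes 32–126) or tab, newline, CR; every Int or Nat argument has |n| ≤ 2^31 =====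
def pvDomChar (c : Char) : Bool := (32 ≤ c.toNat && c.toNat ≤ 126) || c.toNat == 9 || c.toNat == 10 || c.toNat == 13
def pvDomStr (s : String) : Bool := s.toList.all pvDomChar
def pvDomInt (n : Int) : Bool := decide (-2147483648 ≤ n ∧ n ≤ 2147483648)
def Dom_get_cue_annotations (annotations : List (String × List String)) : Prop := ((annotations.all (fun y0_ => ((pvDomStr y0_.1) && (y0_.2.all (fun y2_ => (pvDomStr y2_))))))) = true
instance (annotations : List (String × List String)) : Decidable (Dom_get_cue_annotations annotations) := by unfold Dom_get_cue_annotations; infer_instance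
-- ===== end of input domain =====

-- B replaces A's running BIO state variable with a presence list plus a local per-position
-- stencil (label from present[i] and present[i-1]); same cost, different decomposition.
-- A is a lazy generator consumed as a list; equivalence is about the returned sequence.

-- ===== PORT A =====
-- zip(*cols) on lists: row count = length of the shortest column; exact for list columns
-- (every index below the minimum is in range for every column, so getD never hits "").
def pvZipLen (cols : List (List String)) : Nat :=
  match cols with
  | [] => 0
  | c :: rest => rest.foldl (fun m col => min m col.length) c.length

def pvZipStar (cols : List (List String)) : List (List String) :=
  match cols with
  | [] => []
  | _ :: _ => (List.range (pvZipLen cols)).map (fun i => cols.map (fun col => col.getD i ""))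

def get_cue_annotations (annotations : List (String × List String)) : List String :=
  let d := PySem.Dict.ofList annotations
  let cue_keys := d.keys.filter (fun key => PySem.Str.startswith key "cue-")
  let cols := cue_keys.map (fun cue_key => d.getD cue_key [])
  ((pvZipStar cols).foldl
    (fun (acc : List String × String) parts =>
      let state := if parts.contains "B" || parts.contains "I" then
          (if acc.2 = "O" then "B" else "I") else "O"
      (acc.1 ++ [state], state))
    ([], "O")).1

-- ===== PORT B =====
def get_cue_annotations_alt (annotations : List (String × List String)) : List String :=
  let d := PySem.Dict.ofList annotations
  let cue_keys := d.keys.filter (fun key => PySem.Str.startswith key "cue-")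
  let cols := cue_keys.map (fun key => d.getD key [])
  let n := ((cols.map List.length).min?).getD 0
  -- Source B indexes col[i] and present[i]/present[i-1] only at in-range nonnegative indices,
  -- so plain List.getD is exact here.
  let present := (List.range n).map (fun i => cols.any (fun col => col.getD i "" == "B" || col.getD i "" == "I"))
  (List.range n).map (fun i =>
    if present.getD i false = false then "O"
    else if i = 0 ∨ present.getD (i - 1) false = false then "B"
    else "I")

-- ===== PRECONDITION & SPEC =====
def Spec_get_cue_annotations (annotations : List (String × List String)) (out : List String) : Prop := out = get_cue_annotations_alt annotations
instance (annotations : List (String × List String)) (out : List String) : Decidable (Spec_get_cue_annotations annotations out) := by unfold Spec_get_cue_annotations; infer_instance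

-- ===== CLAIM (what is proved, stated in full; the proofs are below) =====
def Claim_equal_get_cue_annotations : Prop := ∀ (annotations : List (String × List String)), Dom_get_cue_annotations annotations → Spec_get_cue_annotations annotations (get_cue_annotations annotations)

-- ===== LEMMAS AND PROOFS =====

-- presence of 'B' or 'I' at position i across the columns
def pvQ (cols : List (List String)) (i : Nat) : Bool :=
  cols.any (fun col => col.getD i "" == "B" || col.getD i "" == "I")

-- the local stencil both sides are reduced to
def pvG (cols : List (List String)) (i : Nat) : String :=
  if pvQ cols i = false then "O" else if i = 0 ∨ pvQ cols (i - 1) = false then "B" else "I"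

-- A's loop body, expressed on the presence boolean of row i
def pvStepB (cols : List (List String)) (a : List String × String) (i : Nat) : List String × String :=
  let state := if pvQ cols i then (if a.2 = "O" then "B" else "I") else "O"
  (a.1 ++ [state], state)

lemma pvZipLen_eq (cols : List (List String)) :
    pvZipLen cols = ((cols.map List.length).min?).getD 0 := by
  cases cols with
  | nil => rfl
  | cons c rest => simp [pvZipLen, List.min?, List.foldl_map]

lemma pvRowPresent (cols : List (List String)) (i : Nat) :
    (((cols.map (fun col => col.getD i "")).contains "B")
      || ((cols.map (fun col => col.getD i "")).contains "I")) = pvQ cols i := by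
  simp only [pvQ, List.any_eq, List.contains_map]
  simp only [List.getD_eq_getElem?_getD, Bool.or_eq_true, beq_iff_eq]
  rw [← Bool.decide_or, decide_eq_decide]
  constructor
  · rintro (⟨x, hx, e⟩ | ⟨x, hx, e⟩)
    exacts [⟨x, hx, Or.inl e.symm⟩, ⟨x, hx, Or.inr e.symm⟩]
  · rintro ⟨x, hx, e | e⟩
    exacts [Or.inl ⟨x, hx, e.symm⟩, Or.inr ⟨x, hx, e.symm⟩]

lemma pvMachine (cols : List (List String)) :
    ∀ (cnt s : Nat) (acc : List String) (st : String),
      (st = "O" ↔ (s = 0 ∨ pvQ cols (s - 1) = false)) →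
      ((List.range' s cnt).foldl (pvStepB cols) (acc, st)).1
        = acc ++ (List.range' s cnt).map (pvG cols) := by
  intro cnt
  induction cnt with
  | zero => intro s acc st _; simp
  | succ k ih =>
    intro s acc st h
    rw [List.range'_succ]
    simp only [List.foldl_cons, List.map_cons]
    by_cases hq : pvQ cols s = false
    · have hg : pvG cols s = "O" := by simp [pvG, hq]
      have hstep : pvStepB cols (acc, st) s = (acc ++ ["O"], "O") := by simp [pvStepB, hq]
      rw [hstep, ih (s + 1) _ _ (by simp [hq]), hg]
      simp
    · have hqt : pvQ cols s = true := by simpa using hq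
      by_cases hst : st = "O"
      · have hc : s = 0 ∨ pvQ cols (s - 1) = false := h.mp hst
        have hg : pvG cols s = "B" := by
          unfold pvG; rw [if_neg (by simp [hqt]), if_pos hc]
        have hstep : pvStepB cols (acc, st) s = (acc ++ ["B"], "B") := by
          simp [pvStepB, hqt, hst]
        rw [hstep, ih (s + 1) _ _ (by simp [hqt]), hg]
        simp
      · have hc : ¬(s = 0 ∨ pvQ cols (s - 1) = false) := fun c => hst (h.mpr c)
        have hg : pvG cols s = "I" := by
          unfold pvG; rw [if_neg (by simp [hqt]), if_neg hc]
        have hstep : pvStepB cols (acc, st) s = (acc ++ ["I"], "I") := by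
          simp [pvStepB, hqt, hst]
        rw [hstep, ih (s + 1) _ _ (by simp [hqt]), hg]
        simp

lemma pvA_eq (cols : List (List String)) :
    ((pvZipStar cols).foldl
      (fun (acc : List String × String) parts =>
        let state := if parts.contains "B" || parts.contains "I" then
            (if acc.2 = "O" then "B" else "I") else "O"
        (acc.1 ++ [state], state))
      ([], "O")).1
    = (List.range (pvZipLen cols)).map (pvG cols) := by
  cases cols with
  | nil => simp [pvZipStar, pvZipLen]
  | cons c rest =>
    show (((List.range (pvZipLen (c :: rest))).map
        (fun i => (c :: rest).map (fun col => col.getD i ""))).foldl _ ([], "O")).1 = _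
    rw [List.foldl_map]
    have hfun : (fun (a : List String × String) i =>
        (fun (acc : List String × String) (parts : List String) =>
          let state := if parts.contains "B" || parts.contains "I" then
              (if acc.2 = "O" then "B" else "I") else "O"
          (acc.1 ++ [state], state)) a ((c :: rest).map (fun col => col.getD i "")))
        = pvStepB (c :: rest) := by
      funext a i
      simp only [pvStepB, pvRowPresent]
    rw [hfun, List.range_eq_range']
    exact pvMachine (c :: rest) (pvZipLen (c :: rest)) 0 [] "O" (by simp)

lemma pvB_eq (cols : List (List String)) :
    (List.range (((cols.map List.length).min?).getD 0)).map (fun i =>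
      if ((List.range (((cols.map List.length).min?).getD 0)).map (fun j =>
            cols.any (fun col => col.getD j "" == "B" || col.getD j "" == "I"))).getD i false = false then "O"
      else if i = 0 ∨ ((List.range (((cols.map List.length).min?).getD 0)).map (fun j =>
            cols.any (fun col => col.getD j "" == "B" || col.getD j "" == "I"))).getD (i - 1) false = false then "B"
      else "I")
    = (List.range (pvZipLen cols)).map (pvG cols) := by
  rw [← pvZipLen_eq]
  apply List.map_congr_left
  intro i hi
  rw [List.mem_range] at hi
  rw [PySem.List.getD_map_range _ _ _ _ hi]
  by_cases hi0 : i = 0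
  · simp [pvG, pvQ, hi0]
  · have hi1 : i - 1 < pvZipLen cols := lt_of_le_of_lt (Nat.sub_le i 1) hi
    rw [PySem.List.getD_map_range _ _ _ _ hi1]
    simp [pvG, pvQ, hi0]

-- ===== VERDICT (by name: the statement is the Claim_ definition above) =====
theorem get_cue_annotations_spec : Claim_equal_get_cue_annotations := by
  intro annotations _
  unfold Spec_get_cue_annotations get_cue_annotations get_cue_annotations_alt
  rw [pvA_eq, ← pvB_eq]
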